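-- pv_equiv track=rewrite | github.com/sanathNU/University-Courses | CCN/CCN Labs/Stuffing.py | stuffing
-- ===== SOURCE A (Python) =====
-- def stuffing(message):
--     counter = 0
--     final =[]
--     for item in message:
--         if item=='0':
--             counter = 0
--             final.append('0')
--         if item=='1':
--             counter+=1
--             if counter==5:
--                 counter=0
--                 final.append('10')
--             else:
--                 final.append('1')
--     return ''.join(final)
-- ===== SOURCE B (Python) =====
-- def stuffing(message):
--     # Run-length approach: keep only binary chars (A ignores others without
--     # resetting its counter), then stuff each maximal run of ones arithmetically.
--     bits = [c for c in message if c in '01']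
--     n = len(bits)
--     out = []
--     i = 0
--     while i < n:
--         if bits[i] == '0':
--             out.append('0')
--             i += 1
--         else:
--             j = i
--             while j < n and bits[j] == '1':
--                 j += 1
--             k = j - i
--             out.append('111110' * (k // 5) + '1' * (k % 5))
--             i = j
--     return ''.join(out)
-- ===== Notes on version B (the rewrite author's own statement) =====
-- stated objective: alternative
-- what changed: A scans character by character maintaining a counter of consecutive ones; B filters to the binary characters once and then stuffs each maximal run of k ones in one step by a closed-form repetition (k//5 stuffed blocks plus k%5 leftover ones).
import Mathlib
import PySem

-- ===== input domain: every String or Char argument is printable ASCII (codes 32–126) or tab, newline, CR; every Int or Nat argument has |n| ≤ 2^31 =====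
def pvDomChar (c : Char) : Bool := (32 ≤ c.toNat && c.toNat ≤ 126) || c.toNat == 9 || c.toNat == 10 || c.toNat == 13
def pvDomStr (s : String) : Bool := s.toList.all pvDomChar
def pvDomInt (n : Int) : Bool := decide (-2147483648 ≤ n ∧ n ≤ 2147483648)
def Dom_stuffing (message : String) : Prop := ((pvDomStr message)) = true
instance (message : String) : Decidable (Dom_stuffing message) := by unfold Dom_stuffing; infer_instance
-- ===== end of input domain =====

-- B replaces A's per-character counter automaton by a run-length computation: it
-- filters to the binary characters (A ignores others without resetting its counter)
-- and stuffs each maximal run of k ones arithmetically ('111110'*(k//5) + '1'*(k%5)).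

-- ===== PORT A =====
def stuffingStep (st : Nat × List (List Char)) (item : Char) : Nat × List (List Char) :=
  -- 'if item=='0': counter = 0; final.append('0')'
  let st := if item == '0' then (0, st.2 ++ [['0']]) else st
  -- 'if item=='1': counter += 1; if counter==5: … else: …'
  if item == '1' then
    if st.1 + 1 == 5 then (0, st.2 ++ [['1','0']])
    else (st.1 + 1, st.2 ++ [['1']])
  else st

def stuffing (message : String) : String :=
  let r := message.toList.foldl stuffingStep (0, [])
  String.mk r.2.flatten          -- ''.join(final)

-- ===== PORT B =====
-- '111110' * (k // 5) + '1' * (k % 5)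
def stuffRun (k : Nat) : List Char :=
  (List.replicate (k / 5) ['1', '1', '1', '1', '1', '0']).flatten ++ List.replicate (k % 5) '1'

-- the outer while loop of Source B, scanning runs
def bcore : List Char → List Char
  | [] => []
  | c :: t =>
    if c == '0' then '0' :: bcore t
    else
      -- inner while loop: j advances over the run of ones (head c = '1' plus takeWhile)
      stuffRun ((t.takeWhile (· == '1')).length + 1) ++ bcore (t.dropWhile (· == '1'))
termination_by l => l.length
decreasing_by
  · simp
  · exact Nat.lt_succ_of_le (List.length_dropWhile_le _ _)

def stuffing_alt (message : String) : String :=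
  let bits := message.toList.filter (fun c => c == '0' || c == '1')
  String.mk (bcore bits)

-- ===== PRECONDITION & SPEC =====
def Spec_stuffing (message : String) (out : String) : Prop := out = stuffing_alt message
instance (message : String) (out : String) : Decidable (Spec_stuffing message out) := by unfold Spec_stuffing; infer_instance

-- ===== CLAIM (what is proved, stated in full; the proofs are below) =====
def Claim_equal_stuffing : Prop := ∀ (message : String), Dom_stuffing message → Spec_stuffing message (stuffing message)

-- ===== LEMMAS AND PROOFS =====

-- reference automaton: A's counter machine, acting directly on the char list
def fRef : Nat → List Char → List Char
  | _, [] => []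
  | cnt, c :: t =>
    if c = '0' then '0' :: fRef 0 t
    else if c = '1' then
      (if cnt + 1 = 5 then '1' :: '0' :: fRef 0 t else '1' :: fRef (cnt + 1) t)
    else fRef cnt t

theorem foldl_stuffingStep (l : List Char) :
    ∀ (cnt : Nat) (acc : List (List Char)),
      (l.foldl stuffingStep (cnt, acc)).2.flatten = acc.flatten ++ fRef cnt l := by
  induction l with
  | nil => intro cnt acc; simp [fRef]
  | cons c t ih =>
    intro cnt acc
    by_cases h0 : c = '0'
    · subst h0; simp [stuffingStep, fRef, ih]
    · by_cases h1 : c = '1'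
      · subst h1
        by_cases h5 : cnt + 1 = 5
        · simp [stuffingStep, fRef, ih, h5]
        · have h4 : ¬ cnt = 4 := by omega
          simp [stuffingStep, fRef, ih, h5, h4]
      · simp [stuffingStep, fRef, h0, h1, ih]

theorem fRef_filter (l : List Char) :
    ∀ cnt, fRef cnt l = fRef cnt (l.filter (fun c => c == '0' || c == '1')) := by
  induction l with
  | nil => intro cnt; rfl
  | cons c t ih =>
    intro cnt
    by_cases h0 : c = '0'
    · subst h0; simp [fRef, ih]
    · by_cases h1 : c = '1'
      · subst h1; by_cases h5 : cnt + 1 = 5 <;> simp [fRef, h5, ih]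
      · simp [fRef, h0, h1, ih]

theorem fRef_cnt_irrel (rest : List Char) (h : rest = [] ∨ rest.head? = some '0') (c : Nat) :
    fRef c rest = fRef 0 rest := by
  rcases h with h | h
  · subst h; rfl
  · cases rest with
    | nil => rfl
    | cons a t =>
      simp at h
      subst h
      simp [fRef]

theorem fRef_run (k : Nat) (rest : List Char) (h : rest = [] ∨ rest.head? = some '0') :
    fRef 0 (List.replicate k '1' ++ rest) = stuffRun k ++ fRef 0 rest := by
  induction k using Nat.strong_induction_on with
  | _ k ih =>
    by_cases hk : k < 5
    · interval_cases k
      · simp [stuffRun]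
      · simp only [List.replicate, List.cons_append, List.nil_append]
        simp [fRef, stuffRun, fRef_cnt_irrel rest h]
      · simp only [List.replicate, List.cons_append, List.nil_append]
        simp [fRef, stuffRun, fRef_cnt_irrel rest h, List.replicate]
      · simp only [List.replicate, List.cons_append, List.nil_append]
        simp [fRef, stuffRun, fRef_cnt_irrel rest h, List.replicate]
      · simp only [List.replicate, List.cons_append, List.nil_append]
        simp [fRef, stuffRun, fRef_cnt_irrel rest h, List.replicate]
    · have h5 : k = 5 + (k - 5) := by omega
      rw [h5, List.replicate_add, List.append_assoc]
      have hlt : k - 5 < k := by omega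
      have hrec := ih (k - 5) hlt
      simp only [List.replicate, List.cons_append, List.nil_append]
      simp [fRef, hrec]
      have hdiv : k / 5 = (k - 5) / 5 + 1 := by omega
      have hmod : k % 5 = (k - 5) % 5 := by omega
      simp [stuffRun, List.replicate]

theorem head?_dropWhile_ones (t : List Char) :
    t.dropWhile (· == '1') = [] ∨ (t.dropWhile (· == '1')).head? = some '0' ∨
      ∃ a rest, t.dropWhile (· == '1') = a :: rest ∧ a ≠ '0' ∧ a ≠ '1' := by
  induction t with
  | nil => left; rfl
  | cons a t ih =>
    by_cases h1 : a = '1'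
    · subst h1; simpa [List.dropWhile] using ih
    · by_cases h0 : a = '0'
      · subst h0; right; left; simp [List.dropWhile]
      · right; right; exact ⟨a, t, by simp [h1], h0, h1⟩

theorem cons_replicate_append (n : Nat) (a : Char) (l : List Char) :
    a :: (List.replicate n a ++ l) = List.replicate (n + 1) a ++ l := by
  simp [List.replicate_succ]

theorem bcore_eq_fRef (l : List Char) (hb : ∀ c ∈ l, c = '0' ∨ c = '1') :
    bcore l = fRef 0 l := by
  induction hn : l.length using Nat.strong_induction_on generalizing l with
  | _ n ih =>
    subst hn
    cases l with
    | nil => rw [bcore]; rfl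
    | cons c t =>
      rcases hb c (by simp) with h0 | h1
      · subst h0
        rw [bcore, fRef]
        simp [ih t.length (by simp) t (fun c hc => hb c (List.mem_cons_of_mem _ hc)) rfl]
      · subst h1
        rw [bcore]
        simp only [Char.reduceBEq]
        -- decompose the run
        have htake : t.takeWhile (· == '1') = List.replicate (t.takeWhile (· == '1')).length '1' := by
          apply List.eq_replicate_length.mpr
          intro b hbmem
          have := List.mem_takeWhile_imp hbmem
          simpa using this
        have hsplit : ('1' :: t : List Char) =
            List.replicate ((t.takeWhile (· == '1')).length + 1) '1' ++ t.dropWhile (· == '1') := by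
          conv_lhs => rw [show t = t.takeWhile (· == '1') ++ t.dropWhile (· == '1') from
            (List.takeWhile_append_dropWhile).symm]
          rw [List.replicate_succ']
          conv_lhs => rw [htake]
          rw [cons_replicate_append]
          simp [List.replicate_succ', List.append_assoc]
        have hrest_mem : ∀ c ∈ t.dropWhile (· == '1'), c = '0' ∨ c = '1' := by
          intro c hc
          exact hb c (List.mem_cons_of_mem _ ((List.dropWhile_sublist _).subset hc))
        have hhead : t.dropWhile (· == '1') = [] ∨ (t.dropWhile (· == '1')).head? = some '0' := by
          rcases head?_dropWhile_ones t with h | h | ⟨a, rest, heq, ha0, ha1⟩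
          · exact Or.inl h
          · exact Or.inr h
          · exfalso
            rcases hrest_mem a (by rw [heq]; simp) with h | h
            · exact ha0 h
            · exact ha1 h
        rw [hsplit, fRef_run _ _ hhead]
        simp only [if_neg (Bool.false_ne_true)]
        congr 1
        have hlen : (t.dropWhile (· == '1')).length < ('1' :: t : List Char).length :=
          Nat.lt_succ_of_le (List.length_dropWhile_le _ _)
        exact ih _ hlen _ hrest_mem rfl

-- ===== VERDICT (by name: the statement is the Claim_ definition above) =====
theorem stuffing_spec : Claim_equal_stuffing := by
  intro message _
  show stuffing message = stuffing_alt message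
  unfold stuffing stuffing_alt
  simp only []
  have h1 := foldl_stuffingStep message.toList 0 []
  have hb : ∀ c ∈ message.toList.filter (fun c => c == '0' || c == '1'), c = '0' ∨ c = '1' := by
    intro c hc
    simp only [List.mem_filter, Bool.or_eq_true, beq_iff_eq] at hc
    exact hc.2
  rw [h1, fRef_filter, ← bcore_eq_fRef _ hb]
  simp
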